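-- pv_equiv track=rewrite | github.com/minseonga/LAVA_for_hv | scripts/analyze_track_b_subset.py | to_layer_map
-- ===== SOURCE A (Python) =====
-- from typing import Any, Dict, Iterable, List, Sequence
--
-- def to_layer_map(items: Iterable[Dict[str, Any]]) -> Dict[str, List[int]]:
--     mp: Dict[str, List[int]] = {}
--     for item in items:
--         li = str(int(item["layer"]))
--         hi = int(item["head"])
--         mp.setdefault(li, []).append(hi)
--     for k in list(mp.keys()):
--         mp[k] = sorted(set(mp[k]))
--     return mp
-- ===== SOURCE B (Python) =====
-- def to_layer_map(items):
--     pairs = [(str(int(item["layer"])), int(item["head"])) for item in items]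
--     out = {}
--     for li, _ in pairs:
--         if li not in out:
--             out[li] = sorted({h for l, h in pairs if l == li})
--     return out
-- ===== Notes on version B (the rewrite author's own statement) =====
-- stated objective: alternative
-- what changed: Instead of hash-bucketing heads per layer and then rewriting every bucket with sorted(set(...)) in a second dict pass, B materialises the (layer, head) pair list once and, at each layer's first occurrence, builds its final sorted deduplicated head list directly with one set-comprehension scan over the pairs.
import Mathlib
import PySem

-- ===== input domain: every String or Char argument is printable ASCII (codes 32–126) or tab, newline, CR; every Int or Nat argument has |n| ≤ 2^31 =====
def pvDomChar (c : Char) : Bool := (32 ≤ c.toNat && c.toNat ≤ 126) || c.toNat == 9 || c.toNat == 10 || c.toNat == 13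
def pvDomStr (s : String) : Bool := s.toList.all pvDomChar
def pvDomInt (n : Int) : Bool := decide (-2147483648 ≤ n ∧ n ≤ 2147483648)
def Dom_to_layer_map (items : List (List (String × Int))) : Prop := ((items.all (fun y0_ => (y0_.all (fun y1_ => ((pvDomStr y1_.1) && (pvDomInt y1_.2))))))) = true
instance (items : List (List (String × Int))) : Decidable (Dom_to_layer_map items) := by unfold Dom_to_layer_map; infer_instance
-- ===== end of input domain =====

-- B builds each layer's sorted, deduplicated head list directly from the pair list at the layer's
-- first occurrence, instead of A's bucket-append dict followed by a second sorted(set(...)) pass.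

-- ===== PORT A =====
def to_layer_map (items : List (List (String × Int))) : List (String × List Int) :=
  -- mp.setdefault(li, []).append(hi)  ==  mp[li] = mp.get(li, []) + [hi]  ==  Dict.modify li [] (· ++ [hi])
  let mp : PySem.Dict String (List Int) := items.foldl (fun mp item =>
    let li := PySem.Int.toStr (PySem.Dict.getD (PySem.Dict.mk item) "layer" 0)
    let hi := PySem.Dict.getD (PySem.Dict.mk item) "head" 0
    mp.modify li [] (fun v => v ++ [hi])) PySem.Dict.empty
  -- for k in list(mp.keys()): mp[k] = sorted(set(mp[k]))
  let mp2 := (mp.keys).foldl (fun d k =>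
    d.insert k (PySem.List.sorted (PySem.Set.ofList (d.getD k [])) (fun x => x) false)) mp
  mp2.items

-- ===== PORT B =====
def to_layer_map_alt (items : List (List (String × Int))) : List (String × List Int) :=
  let pairs : List (String × Int) := items.map (fun item =>
    (PySem.Int.toStr (PySem.Dict.getD (PySem.Dict.mk item) "layer" 0),
     PySem.Dict.getD (PySem.Dict.mk item) "head" 0))
  let out : PySem.Dict String (List Int) := pairs.foldl (fun out p =>
    if out.contains p.1 then out
    else out.insert p.1 (PySem.List.sorted
      (PySem.Set.ofList ((pairs.filter (fun q => q.1 == p.1)).map (fun q => q.2)))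
      (fun x => x) false)) PySem.Dict.empty
  out.items

-- ===== PRECONDITION & SPEC =====
-- Pre_ excludes exactly the items on which Python's item["layer"] / item["head"] raises KeyError.
def Pre_to_layer_map (items : List (List (String × Int))) : Prop :=
  ∀ it ∈ items, "layer" ∈ it.map Prod.fst ∧ "head" ∈ it.map Prod.fst
instance (items : List (List (String × Int))) : Decidable (Pre_to_layer_map items) := by unfold Pre_to_layer_map; infer_instance
def pvWitness_to_layer_map : (List (List (String × Int))) :=
  [[("layer", 3), ("head", 5)], [("layer", 3), ("head", 2)], [("layer", 1), ("head", 5)]]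
def Spec_to_layer_map (items : List (List (String × Int))) (out : List (String × List Int)) : Prop := out = to_layer_map_alt items
instance (items : List (List (String × Int))) (out : List (String × List Int)) : Decidable (Spec_to_layer_map items out) := by unfold Spec_to_layer_map; infer_instance

-- ===== CLAIM (what is proved, stated in full; the proofs are below) =====
def Claim_equal_to_layer_map : Prop := ∀ (items : List (List (String × Int))), Dom_to_layer_map items → Pre_to_layer_map items → Spec_to_layer_map items (to_layer_map items)

-- ===== LEMMAS AND PROOFS =====

-- the keys of `ks` not yet in `seen`, first occurrences, in order
def freshKeys (seen : List String) : List String → List String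
  | [] => []
  | k :: ks => if k ∈ seen then freshKeys seen ks else k :: freshKeys (seen ++ [k]) ks

lemma set_update_eq_append_fresh (ks : List String) : ∀ (s : PySem.Set String),
    PySem.Set.update s ks = s ++ freshKeys s ks := by
  induction ks with
  | nil => intro s; simp [PySem.Set.update, freshKeys]
  | cons k ks ih =>
    intro s
    by_cases h : k ∈ s
    · have : PySem.Set.add s k = s := by
        simp [PySem.Set.add, PySem.Set.contains, h]
      simp [PySem.Set.update, freshKeys, h] at ih ⊢
      simpa [PySem.Set.update] using ih s
    · have : PySem.Set.add s k = s ++ [k] := by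
        simp [PySem.Set.add, PySem.Set.contains, h]
      simp [PySem.Set.update, freshKeys, h]
      simpa [PySem.Set.update] using ih (s ++ [k])

lemma fresh_nil_of_subset (ks : List String) : ∀ (s : List String), (∀ x ∈ ks, x ∈ s) →
    freshKeys s ks = [] := by
  induction ks with
  | nil => intro s _; rfl
  | cons k ks ih =>
    intro s h
    simp [freshKeys, h k (by simp)]
    exact ih s (fun x hx => h x (by simp [hx]))

-- B's loop: at each fresh key it appends (k, g k); processed keys accumulate as freshKeys
lemma b_fold (g : String → List Int) :
    ∀ (l : List (String × Int)) (d : PySem.Dict String (List Int)), d.keys.Nodup →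
    (l.foldl (fun out p => if out.contains p.1 then out else out.insert p.1 (g p.1)) d).items
      = d.items ++ (freshKeys d.keys (l.map Prod.fst)).map (fun k => (k, g k)) := by
  intro l
  induction l with
  | nil => intro d _; simp [freshKeys]
  | cons p l ih =>
    intro d hnd
    by_cases h : d.contains p.1 = true
    · have hm : p.1 ∈ d.keys := by
        simpa [PySem.Dict.contains_eq_decide_mem_keys] using h
      simp only [List.foldl_cons, h, List.map_cons, freshKeys, hm, if_pos]
      exact ih d hnd
    · have h' : d.contains p.1 = false := by simpa using h
      have hm : p.1 ∉ d.keys := by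
        simpa [PySem.Dict.contains_eq_decide_mem_keys] using h'
      have hitems := PySem.Dict.items_insert_of_not_contains d (g p.1) h'
      have hkeys : (d.insert p.1 (g p.1)).keys = d.keys ++ [p.1] := by
        simp [PySem.Dict.keys, hitems]
      have hnd' : (d.insert p.1 (g p.1)).keys.Nodup := by
        rw [hkeys]
        exact (List.perm_append_singleton p.1 d.keys).nodup_iff.mpr (by simp [hnd, hm])
      simp only [List.foldl_cons, h', Bool.false_eq_true, if_false, List.map_cons, freshKeys, hm,
        if_false]
      rw [ih _ hnd', hitems, hkeys]
      simp

-- A's second loop read through getD: each key listed once gets its value rewritten by F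
lemma a_fold2_getD (F : List Int → List Int) :
    ∀ (ks : List String) (d : PySem.Dict String (List Int)) (k' : String), ks.Nodup →
    ((ks.foldl (fun d k => d.insert k (F (d.getD k []))) d).getD k' [])
      = if k' ∈ ks then F (d.getD k' []) else d.getD k' [] := by
  intro ks
  induction ks with
  | nil => intro d k' _; simp
  | cons k ks ih =>
    intro d k' hnd
    have hnd' := hnd.of_cons
    have hk : k ∉ ks := by simpa using (List.nodup_cons.mp hnd).1
    by_cases hkk : k' = k
    · subst hkk
      simp only [List.foldl_cons]
      rw [ih _ _ hnd', if_neg hk, PySem.Dict.getD_insert_self]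
      simp
    · simp only [List.foldl_cons]
      rw [ih _ _ hnd', PySem.Dict.getD_insert_of_ne _ _ _ hkk]
      simp [hkk]

lemma a_fold2_items (F : List Int → List Int) (d : PySem.Dict String (List Int))
    (hnd : d.keys.Nodup) :
    ((d.keys).foldl (fun d k => d.insert k (F (d.getD k []))) d).items
      = d.keys.map (fun k => (k, F (d.getD k []))) := by
  have hkeys : ((d.keys).foldl (fun d k => d.insert k (F (d.getD k []))) d).keys = d.keys := by
    rw [PySem.Dict.keys_foldl_insert]
    rw [set_update_eq_append_fresh, fresh_nil_of_subset _ _ (fun x hx => hx)]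
    simp
  have hnd2 : ((d.keys).foldl (fun d k => d.insert k (F (d.getD k []))) d).keys.Nodup := by
    rw [hkeys]; exact hnd
  rw [PySem.Dict.items_eq_map_keys _ hnd2 [], hkeys]
  apply List.map_congr_left
  intro k hk
  rw [a_fold2_getD F d.keys d k hnd, if_pos hk]

lemma update_nil_eq_ofList (l : List String) :
    PySem.Set.update ([] : PySem.Set String) l = PySem.Set.ofList l := by
  rw [PySem.Set.ofList_eq_foldl]; rfl

lemma fresh_nil_eq_ofList (l : List String) :
    freshKeys [] l = PySem.Set.ofList l := by
  have := set_update_eq_append_fresh l ([] : PySem.Set String)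
  rw [update_nil_eq_ofList] at this
  simpa using this.symm

theorem to_layer_map_eq_alt (items : List (List (String × Int))) :
    to_layer_map items = to_layer_map_alt items := by
  simp only [to_layer_map, to_layer_map_alt]
  set f : List (String × Int) → String × Int := fun item =>
    (PySem.Int.toStr (PySem.Dict.getD (PySem.Dict.mk item) "layer" 0),
     PySem.Dict.getD (PySem.Dict.mk item) "head" 0) with hf
  set pairs : List (String × Int) := items.map f with hpairs
  -- A's first loop, as a fold over the pair list
  have hA1 : (items.foldl (fun mp item =>
      (mp : PySem.Dict String (List Int)).modify
        (PySem.Int.toStr (PySem.Dict.getD (PySem.Dict.mk item) "layer" 0)) []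
        (fun v => v ++ [PySem.Dict.getD (PySem.Dict.mk item) "head" 0]))
        (PySem.Dict.empty : PySem.Dict String (List Int)))
      = pairs.foldl (fun mp p => mp.modify p.1 [] (fun v => v ++ [p.2])) PySem.Dict.empty := by
    rw [hpairs, List.foldl_map]
  rw [hA1]
  set mp := pairs.foldl (fun mp p => mp.modify p.1 [] (fun v => v ++ [p.2]))
    (PySem.Dict.empty : PySem.Dict String (List Int)) with hmp
  have hempk : (PySem.Dict.empty : PySem.Dict String (List Int)).keys = [] := by
    simp [PySem.Dict.keys, PySem.Dict.empty]
  have hkeys : mp.keys = PySem.Set.ofList (pairs.map Prod.fst) := by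
    rw [hmp, PySem.Dict.keys_foldl_modify_key pairs Prod.fst [] (fun _ p v => v ++ [p.2]),
      hempk, update_nil_eq_ofList]
  have hnd : mp.keys.Nodup := by
    rw [hmp]
    exact PySem.Dict.nodup_keys_foldl_modify_key pairs Prod.fst [] (fun _ p v => v ++ [p.2]) _
      (by rw [hempk]; exact List.nodup_nil)
  have hgetD : ∀ k, mp.getD k [] = (pairs.filter (fun q => q.1 == k)).map (fun q => q.2) := by
    intro k
    rw [hmp, PySem.Dict.getD_foldl_modify_append]
    simp
  rw [a_fold2_items (fun v => PySem.List.sorted (PySem.Set.ofList v) (fun x => x) false) mp hnd]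
  rw [b_fold (fun k => PySem.List.sorted
      (PySem.Set.ofList ((pairs.filter (fun q => q.1 == k)).map (fun q => q.2)))
      (fun x => x) false) pairs PySem.Dict.empty (by rw [hempk]; exact List.nodup_nil)]
  rw [hempk, fresh_nil_eq_ofList, hkeys]
  have hempitems : (PySem.Dict.empty : PySem.Dict String (List Int)).items = [] := by
    simp [PySem.Dict.empty]
  rw [hempitems, List.nil_append]
  apply List.map_congr_left
  intro k _
  rw [hgetD k]

-- ===== VERDICT (by name: the statement is the Claim_ definition above) =====
theorem to_layer_map_spec : Claim_equal_to_layer_map := by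
  intro items _ _
  unfold Spec_to_layer_map
  exact to_layer_map_eq_alt items
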